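-- pv_equiv track=rewrite | github.com/KimJinSuAI/CodingTestPractice | 넥슨/2.py | paperCuttings
-- ===== SOURCE A (Python) =====
-- def paperCuttings(textLength, starting, ending):
--     # Write your code here
--     count = 0
--     nodes = list(set(zip(starting,ending)))
--     nodes.sort(key = lambda x: (x[0],x[1]))
--     N = len(nodes)
--     for i in range(N):
--         end = nodes[i][1]
--         n = N-i-1
--         for j in range(i+1,N):
--             if nodes[j][0]<=end:
--                 n-=1
--             else:
--                 break
--         count+=n
--
--     return count
-- ===== SOURCE B (Python) =====
-- def _bisect_right(a, x):
--     # CPython's bisect_right algorithm, written out (A imports nothing)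
--     lo, hi = 0, len(a)
--     while lo < hi:
--         mid = (lo + hi) // 2
--         if x < a[mid]:
--             hi = mid
--         else:
--             lo = mid + 1
--     return lo
--
--
-- def paperCuttings(textLength, starting, ending):
--     nodes = sorted(set(zip(starting, ending)))
--     starts = [s for s, _ in nodes]
--     n = len(nodes)
--     total = 0
--     for i, (_, e) in enumerate(nodes):
--         total += n - max(i + 1, _bisect_right(starts, e))
--     return total
-- ===== Notes on version B (the rewrite author's own statement) =====
-- stated objective: faster
-- what changed: A's inner linear scan over the suffix (breaking at the first start greater than the current end) is replaced by one binary search (bisect_right) on the sorted start list per node, combined with max(i+1, .) to discount earlier nodes.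
import Mathlib
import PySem

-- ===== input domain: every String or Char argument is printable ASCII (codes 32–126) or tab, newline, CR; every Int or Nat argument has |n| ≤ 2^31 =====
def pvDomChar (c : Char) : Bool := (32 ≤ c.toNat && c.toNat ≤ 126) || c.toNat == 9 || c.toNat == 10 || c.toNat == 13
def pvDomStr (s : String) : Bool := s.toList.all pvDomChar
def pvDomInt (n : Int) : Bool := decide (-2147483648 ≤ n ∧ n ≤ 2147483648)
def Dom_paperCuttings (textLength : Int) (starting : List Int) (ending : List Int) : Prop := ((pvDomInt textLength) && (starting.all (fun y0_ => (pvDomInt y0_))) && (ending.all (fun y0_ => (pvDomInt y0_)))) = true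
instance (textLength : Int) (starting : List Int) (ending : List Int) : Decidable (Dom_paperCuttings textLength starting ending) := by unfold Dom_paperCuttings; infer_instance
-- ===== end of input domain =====

-- B replaces A's inner linear scan (break on first start > end) by one bisect_right
-- per node on the sorted start list: O(N log N) instead of O(N^2) after the shared sort.

-- ===== PORT A =====
-- inner loop: 'n = N-i-1; for j in range(i+1, N): if nodes[j][0] <= end: n -= 1 else: break'
def pcInnerA (endv : Int) : List (Int × Int) → Int → Int
  | [], n => n
  | q :: t, n => if q.1 ≤ endv then pcInnerA endv t (n - 1) else n

-- outer loop: 'for i in range(N): … count += n' (iteration i reads nodes[i] and scans the suffix after it)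
def pcOuterA : List (Int × Int) → Int → Int
  | [], count => count
  | p :: t, count => pcOuterA t (count + pcInnerA p.2 t (t.length : Int))

def paperCuttings (textLength : Int) (starting : List Int) (ending : List Int) : Int :=
  -- nodes = list(set(zip(starting, ending))); nodes.sort(key=lambda x: (x[0], x[1]))
  let nodes := PySem.List.sorted2 (PySem.Set.ofList (starting.zip ending)) (fun x => x.1) (fun x => x.2)
  pcOuterA nodes 0

-- ===== PORT B =====
-- 'for i, (_, e) in enumerate(nodes): total += n - max(i + 1, _bisect_right(starts, e))'
-- Source B's _bisect_right is CPython's bisect_right algorithm verbatim = PySem.List.bisectRight.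
def pcLoopB (starts : List Int) (N : Nat) : List (Int × Int) → Nat → Int → Int
  | [], _, total => total
  | p :: t, i, total =>
      pcLoopB starts N t (i + 1)
        (total + ((N : Int) - ((max (i + 1) (PySem.List.bisectRight starts p.2) : Nat) : Int)))

def paperCuttings_alt (textLength : Int) (starting : List Int) (ending : List Int) : Int :=
  -- nodes = sorted(set(zip(starting, ending)))  (tuple order = key (x[0], x[1]))
  let nodes := PySem.List.sorted2 (PySem.Set.ofList (starting.zip ending)) (fun x => x.1) (fun x => x.2)
  let starts := nodes.map (fun x => x.1)
  pcLoopB starts nodes.length nodes 0 0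

-- ===== PRECONDITION & SPEC =====
def Spec_paperCuttings (textLength : Int) (starting : List Int) (ending : List Int) (out : Int) : Prop := out = paperCuttings_alt textLength starting ending
instance (textLength : Int) (starting : List Int) (ending : List Int) (out : Int) : Decidable (Spec_paperCuttings textLength starting ending out) := by unfold Spec_paperCuttings; infer_instance

-- ===== CLAIM (what is proved, stated in full; the proofs are below) =====
def Claim_equal_paperCuttings : Prop := ∀ (textLength : Int) (starting : List Int) (ending : List Int), Dom_paperCuttings textLength starting ending → Spec_paperCuttings textLength starting ending (paperCuttings textLength starting ending)

-- ===== LEMMAS AND PROOFS =====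

-- the Boolean 'before' comparison sorted2 sorts with (key fst, then snd)
def pcBlex (a b : Int × Int) : Bool :=
  decide (a.1 < b.1) || (!decide (b.1 < a.1) && decide (a.2 < b.2))

-- the (non-strict) lexicographic order the sorted node list satisfies
def pcRle (a b : Int × Int) : Prop := a.1 < b.1 ∨ (a.1 = b.1 ∧ a.2 ≤ b.2)

lemma pcInsertBy_pairwise (x : Int × Int) (ys : List (Int × Int))
    (h : ys.Pairwise pcRle) : (PySem.List.insertBy pcBlex x ys).Pairwise pcRle := by
  induction ys with
  | nil => simpa [PySem.List.insertBy] using List.pairwise_singleton pcRle x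
  | cons y t ih =>
      rw [List.pairwise_cons] at h
      obtain ⟨hy, ht⟩ := h
      by_cases hb : pcBlex x y = true
      · rw [PySem.List.insertBy, if_pos hb, List.pairwise_cons]
        refine ⟨?_, List.pairwise_cons.mpr ⟨hy, ht⟩⟩
        intro z hz
        have hxy : pcRle x y := by
          simp only [pcBlex, Bool.or_eq_true, Bool.and_eq_true, Bool.not_eq_true',
            decide_eq_true_eq, decide_eq_false_iff_not] at hb
          unfold pcRle
          rcases hb with h1 | ⟨h1, h2⟩ <;> omega
        rcases List.mem_cons.mp hz with rfl | hz
        · exact hxy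
        · have h2 := hy z hz
          unfold pcRle at hxy h2 ⊢
          rcases hxy with h1 | ⟨h1a, h1b⟩ <;> rcases h2 with h2 | ⟨h2a, h2b⟩ <;> omega
      · rw [PySem.List.insertBy, if_neg hb, List.pairwise_cons]
        refine ⟨?_, ih ht⟩
        intro z hz
        rw [PySem.List.insertBy_mem_iff] at hz
        rcases hz with rfl | hz
        · -- z = x: pcRle y x follows from ¬ pcBlex x y
          simp only [pcBlex, Bool.or_eq_true, Bool.and_eq_true, Bool.not_eq_true',
            decide_eq_true_eq, decide_eq_false_iff_not] at hb
          unfold pcRle; omega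
        · exact hy z hz

lemma pcSorted2_pairwise (xs : List (Int × Int)) :
    (PySem.List.sorted2 xs (fun x => x.1) (fun x => x.2)).Pairwise pcRle := by
  have hfold : ∀ (l : List (Int × Int)) (acc : List (Int × Int)), acc.Pairwise pcRle →
      (l.foldl (fun acc x => PySem.List.insertBy pcBlex x acc) acc).Pairwise pcRle := by
    intro l
    induction l with
    | nil => intro acc h; simpa using h
    | cons x t ih => intro acc h; exact ih _ (pcInsertBy_pairwise x acc h)
  have : PySem.List.sorted2 xs (fun x => x.1) (fun x => x.2) =
      xs.foldl (fun acc x => PySem.List.insertBy pcBlex x acc) [] := rfl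
  rw [this]
  exact hfold xs [] List.Pairwise.nil

lemma pcBisect_eq_countP (s : List Int) (e : Int) (h : s.Pairwise (· ≤ ·)) :
    PySem.List.bisectRight s e = s.countP (fun a => decide (a ≤ e)) := by
  obtain ⟨hle, hlt, hgt⟩ := PySem.List.bisectRight_spec s e h
  set br := PySem.List.bisectRight s e with hbr
  have hsplit := List.take_append_drop br s
  have hlen2 : (s.take br).length = br := by rw [List.length_take]; omega
  have h1 : (s.take br).countP (fun a => decide (a ≤ e)) = (s.take br).length := by
    apply List.countP_eq_length.mpr
    intro x hx
    obtain ⟨j, hj, hget⟩ := List.mem_iff_getElem.mp hx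
    have hjbr : j < br := by rw [hlen2] at hj; exact hj
    have hj' : j < s.length := by omega
    rw [List.getElem_take] at hget
    have := hlt j hj' hjbr
    simp [← hget]; omega
  have h2 : (s.drop br).countP (fun a => decide (a ≤ e)) = 0 := by
    apply List.countP_eq_zero.mpr
    intro x hx
    obtain ⟨j, hj, hget⟩ := List.mem_iff_getElem.mp hx
    have hj' : br + j < s.length := by
      have := List.length_drop (l := s) (i := br); omega
    rw [List.getElem_drop] at hget
    have := hgt (br + j) hj' (Nat.le_add_right br j)
    rw [hget] at this
    simp; omega
  have hca : s.countP (fun a => decide (a ≤ e))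
      = (s.take br).countP (fun a => decide (a ≤ e)) + (s.drop br).countP (fun a => decide (a ≤ e)) := by
    rw [← List.countP_append, hsplit]
  omega

lemma pcInnerA_eq (e : Int) : ∀ (t : List (Int × Int)) (n : Int),
    t.Pairwise (fun a b => a.1 ≤ b.1) →
    pcInnerA e t n = n - (t.countP (fun q => decide (q.1 ≤ e)) : Int) := by
  intro t
  induction t with
  | nil => intro n _; simp [pcInnerA]
  | cons q t ih =>
      intro n h
      rw [List.pairwise_cons] at h
      obtain ⟨hq, ht⟩ := h
      by_cases hqe : q.1 ≤ e
      · rw [pcInnerA, if_pos hqe, ih _ ht, List.countP_cons]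
        simp [hqe]; push_cast; ring
      · rw [pcInnerA, if_neg hqe]
        have : (q :: t).countP (fun q => decide (q.1 ≤ e)) = 0 := by
          apply List.countP_eq_zero.mpr
          intro z hz
          rcases List.mem_cons.mp hz with rfl | hz
          · simpa using hqe
          · have := hq z hz; simp; omega
        rw [this]; simp

lemma pcMaxCount (u v : List Int) (e : Int) (h : (u ++ v).Pairwise (· ≤ ·)) :
    max u.length ((u ++ v).countP (fun a => decide (a ≤ e))) =
      u.length + v.countP (fun a => decide (a ≤ e)) := by
  rw [List.countP_append]
  set cu := u.countP (fun a => decide (a ≤ e)) with hcu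
  set cv := v.countP (fun a => decide (a ≤ e)) with hcv
  have hcu_le : cu ≤ u.length := List.countP_le_length
  rcases eq_or_lt_of_le hcu_le with heq | hlt
  · omega
  · -- some element of u is > e, hence every element of v is > e and cv = 0
    have hex : ∃ x ∈ u, ¬ (x ≤ e) := by
      by_contra hall
      push_neg at hall
      have : cu = u.length := List.countP_eq_length.mpr (by intro x hx; simpa using hall x hx)
      omega
    obtain ⟨x, hxu, hxe⟩ := hex
    have hcross := (List.pairwise_append.mp h).2.2
    have hcv0 : cv = 0 := by
      rw [hcv]
      apply List.countP_eq_zero.mpr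
      intro y hy
      have := hcross x hxu y hy
      simp; omega
    omega

lemma pcLoops_eq : ∀ (t pre : List (Int × Int)) (acc : Int),
    ((pre ++ t).map (fun x => x.1)).Pairwise (· ≤ ·) →
    pcOuterA t acc =
      pcLoopB ((pre ++ t).map (fun x => x.1)) (pre ++ t).length t pre.length acc := by
  intro t
  induction t with
  | nil => intro pre acc _; simp [pcOuterA, pcLoopB]
  | cons p t ih =>
      intro pre acc h
      have hsubl : ((t.map (fun x => x.1)).Pairwise (· ≤ ·)) := by
        refine List.Pairwise.sublist ?_ h
        refine List.Sublist.map _ ?_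
        exact (List.sublist_cons_self p t).trans (List.sublist_append_right pre _)
      have ht_fst : t.Pairwise (fun a b => a.1 ≤ b.1) := List.pairwise_map.mp hsubl
      -- A's step value
      have hA : pcInnerA p.2 t (t.length : Int)
          = (t.length : Int) - (t.countP (fun q => decide (q.1 ≤ p.2)) : Int) :=
        pcInnerA_eq p.2 t _ ht_fst
      -- B's step value
      have hsplit : (pre ++ p :: t).map (fun x => x.1)
          = (pre.map (fun x => x.1) ++ [p.1]) ++ t.map (fun x => x.1) := by simp
      have hstarts : ((pre ++ p :: t).map (fun x => x.1)).Pairwise (· ≤ ·) := h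
      have hbr : PySem.List.bisectRight ((pre ++ p :: t).map (fun x => x.1)) p.2
          = ((pre ++ p :: t).map (fun x => x.1)).countP (fun a => decide (a ≤ p.2)) :=
        pcBisect_eq_countP _ _ hstarts
      have hmax : max (pre.length + 1)
            (((pre ++ p :: t).map (fun x => x.1)).countP (fun a => decide (a ≤ p.2)))
          = (pre.length + 1) + (t.map (fun x => x.1)).countP (fun a => decide (a ≤ p.2)) := by
        have := pcMaxCount (pre.map (fun x => x.1) ++ [p.1]) (t.map (fun x => x.1)) p.2
          (by rw [← hsplit]; exact hstarts)
        simpa [hsplit] using this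
      have hcnt : (t.map (fun x => x.1)).countP (fun a => decide (a ≤ p.2))
          = t.countP (fun q => decide (q.1 ≤ p.2)) := by rw [List.countP_map]; rfl
      -- step terms agree
      have hstep : acc + pcInnerA p.2 t (t.length : Int)
          = acc + (((pre ++ p :: t).length : Int)
              - ((max (pre.length + 1)
                  (PySem.List.bisectRight ((pre ++ p :: t).map (fun x => x.1)) p.2) : Nat) : Int)) := by
        rw [hA, hbr, hmax, hcnt]
        have hlen : (pre ++ p :: t).length = pre.length + 1 + t.length := by simp; omega
        have hc_le : t.countP (fun q => decide (q.1 ≤ p.2)) ≤ t.length := List.countP_le_length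
        rw [hlen]; push_cast; omega
      rw [pcOuterA, pcLoopB, hstep]
      have hre : pre ++ p :: t = (pre ++ [p]) ++ t := by simp
      have := ih (pre ++ [p])
        (acc + (((pre ++ p :: t).length : Int)
            - ((max (pre.length + 1)
                (PySem.List.bisectRight ((pre ++ p :: t).map (fun x => x.1)) p.2) : Nat) : Int)))
        (by rw [← hre]; exact h)
      rw [hre]
      simpa using this

-- ===== VERDICT (by name: the statement is the Claim_ definition above) =====
theorem paperCuttings_spec : Claim_equal_paperCuttings := by
  intro textLength starting ending _
  unfold Spec_paperCuttings paperCuttings paperCuttings_alt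
  set nodes := PySem.List.sorted2 (PySem.Set.ofList (starting.zip ending))
    (fun x => x.1) (fun x => x.2) with hnodes
  have hpw : (nodes.map (fun x => x.1)).Pairwise (· ≤ ·) := by
    apply List.pairwise_map.mpr
    exact (pcSorted2_pairwise _).imp (by intro a b hab; unfold pcRle at hab; omega)
  simpa using pcLoops_eq nodes [] 0 (by simpa using hpw)
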